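-- pv_equiv track=rewrite | github.com/alirezaamir/M2D2 | src/utils/prepare_dataset.py | get_TxFx_channels
-- ===== SOURCE A (Python) =====
-- def get_TxFx_channels(dict_list):
--     T7F7 = 0
--     T8F8 = 0
--     for idx, channel in enumerate(dict_list):
--         if channel['label'] == 'F7-T7':
--             T7F7 = idx
--         elif channel['label'] == 'F8-T8':
--             T8F8 = idx
--     return T7F7, T8F8
-- ===== SOURCE B (Python) =====
-- def get_TxFx_channels(dict_list):
--     # Two staged backward searches with early exit, instead of one forward
--     # accumulator pass: the last occurrence of a label is the first one seen
--     # when scanning from the end.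
--     def last_index(label):
--         n = len(dict_list)
--         for k, ch in enumerate(reversed(dict_list)):
--             if ch['label'] == label:
--                 return n - 1 - k
--         return 0
--     return last_index('F7-T7'), last_index('F8-T8')
-- ===== Notes on version B (the rewrite author's own statement) =====
-- stated objective: alternative
-- what changed: Replaces the single forward pass with two running accumulators by two independent backward searches with early exit: scanning the reversed list, the first hit is the last occurrence, so each index is found separately and the loop stops as soon as its label appears.
import Mathlib
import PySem

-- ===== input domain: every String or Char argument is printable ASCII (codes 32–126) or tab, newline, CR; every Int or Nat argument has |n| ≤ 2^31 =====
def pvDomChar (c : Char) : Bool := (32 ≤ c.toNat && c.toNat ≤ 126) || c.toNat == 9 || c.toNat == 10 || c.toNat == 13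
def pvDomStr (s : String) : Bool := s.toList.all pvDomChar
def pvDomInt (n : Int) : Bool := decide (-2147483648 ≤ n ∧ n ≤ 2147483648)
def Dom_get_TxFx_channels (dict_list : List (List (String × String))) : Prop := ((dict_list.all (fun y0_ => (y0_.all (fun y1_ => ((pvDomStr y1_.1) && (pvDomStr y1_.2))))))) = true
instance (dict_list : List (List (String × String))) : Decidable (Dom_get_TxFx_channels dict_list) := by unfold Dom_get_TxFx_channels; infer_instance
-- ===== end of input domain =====

-- B replaces the forward two-accumulator pass by two independent backward searches with
-- early exit (first hit on the reversed list = last occurrence); return-value equivalence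
-- on inputs where every channel dict has a 'label' key.

-- ===== PORT A =====
-- channel['label'] = first match in the association list (none = KeyError, excluded by Pre_)
def get_TxFx_channels (dict_list : List (List (String × String))) : Int × Int :=
  (PySem.List.enumerate dict_list 0).foldl
    (fun (st : Int × Int) p =>
      match p.2.find? (fun q => q.1 == "label") with
      | some q =>
          if q.2 == "F7-T7" then (p.1, st.2)
          else if q.2 == "F8-T8" then (st.1, p.1)
          else st
      | none => st)
    (0, 0)

-- ===== PORT B =====
-- the 'for k, ch in enumerate(reversed(dict_list))' loop with early return, as recursion
-- over the reversed list; the none branch (KeyError in Python) is excluded by Pre_.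
def pvBScan (rev : List (List (String × String))) (n k : Int) (label : String) : Int :=
  match rev with
  | [] => 0
  | ch :: rest =>
      match ch.find? (fun q => q.1 == "label") with
      | some q => if q.2 == label then n - 1 - k else pvBScan rest n (k + 1) label
      | none => pvBScan rest n (k + 1) label

def get_TxFx_channels_alt (dict_list : List (List (String × String))) : Int × Int :=
  (pvBScan dict_list.reverse (dict_list.length : Int) 0 "F7-T7",
   pvBScan dict_list.reverse (dict_list.length : Int) 0 "F8-T8")

-- ===== PRECONDITION & SPEC =====
-- Pre_ excludes channel dicts with no 'label' key, where the Python A raises KeyError.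
def Pre_get_TxFx_channels (dict_list : List (List (String × String))) : Prop :=
  (dict_list.all (fun ch => ch.any (fun q => q.1 == "label"))) = true
instance (dict_list : List (List (String × String))) : Decidable (Pre_get_TxFx_channels dict_list) := by unfold Pre_get_TxFx_channels; infer_instance

def pvWitness_get_TxFx_channels : (List (List (String × String))) :=
  [[("label", "F8-T8")], [("label", "x")], [("label", "F7-T7")]]

def Spec_get_TxFx_channels (dict_list : List (List (String × String))) (out : Int × Int) : Prop := out = get_TxFx_channels_alt dict_list
instance (dict_list : List (List (String × String))) (out : Int × Int) : Decidable (Spec_get_TxFx_channels dict_list out) := by unfold Spec_get_TxFx_channels; infer_instance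

-- ===== CLAIM (what is proved, stated in full; the proofs are below) =====
def Claim_equal_get_TxFx_channels : Prop := ∀ (dict_list : List (List (String × String))), Dom_get_TxFx_channels dict_list → Pre_get_TxFx_channels dict_list → Spec_get_TxFx_channels dict_list (get_TxFx_channels dict_list)

-- ===== LEMMAS AND PROOFS =====

theorem pvBScan_cons (ch : List (String × String)) (rest : List (List (String × String)))
    (n k : Int) (label : String) :
    pvBScan (ch :: rest) n k label =
      match ch.find? (fun q => q.1 == "label") with
      | some q => if q.2 == label then n - 1 - k else pvBScan rest n (k + 1) label
      | none => pvBScan rest n (k + 1) label := rfl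

-- Only n - 1 - k matters, so shifting k up is shifting n down.
theorem pvBScan_shift (rev : List (List (String × String))) :
    ∀ (n k : Int) (label : String),
      pvBScan rev n (k + 1) label = pvBScan rev (n - 1) k label := by
  induction rev with
  | nil => intro n k label; rfl
  | cons ch rest ih =>
    intro n k label
    rw [pvBScan_cons, pvBScan_cons]
    cases ch.find? (fun q => q.1 == "label") with
    | none => exact ih n (k + 1) label
    | some q =>
      by_cases h : q.2 == label
      · simp only [h, if_true]; ring
      · simp only [h, if_false, Bool.false_eq_true, ih n (k + 1) label]

-- A's fold computes exactly B's two backward searches (snoc induction).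
theorem pv_key (l : List (List (String × String))) :
    (PySem.List.enumerate l 0).foldl
      (fun (st : Int × Int) p =>
        match p.2.find? (fun q => q.1 == "label") with
        | some q =>
            if q.2 == "F7-T7" then (p.1, st.2)
            else if q.2 == "F8-T8" then (st.1, p.1)
            else st
        | none => st)
      (0, 0)
    = (pvBScan l.reverse (l.length : Int) 0 "F7-T7",
       pvBScan l.reverse (l.length : Int) 0 "F8-T8") := by
  induction l using List.reverseRecOn with
  | nil => rfl
  | append_singleton l c ih =>
    rw [PySem.List.enumerate_append, List.foldl_append, ih]
    simp only [PySem.List.enumerate_cons, PySem.List.enumerate_nil, List.foldl_cons,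
      List.foldl_nil, List.reverse_append, List.reverse_cons, List.reverse_nil,
      List.nil_append, List.cons_append, List.length_append, List.length_cons,
      List.length_nil, pvBScan_cons]
    cases hf : c.find? (fun q => q.1 == "label") with
    | none =>
      simp only [pvBScan_shift, Prod.mk.injEq]
      constructor <;> · congr 1; push_cast; ring
    | some q =>
      by_cases h7 : (q.2 == "F7-T7") = true
      · have h8 : ¬ (q.2 == "F8-T8") = true := by
          have hq := eq_of_beq h7
          simp [hq]
        simp only [h7, h8, if_true, if_false, Bool.false_eq_true, pvBScan_shift,
          Prod.mk.injEq]
        constructor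
        · push_cast; ring
        · congr 1; push_cast; ring
      · by_cases h8 : (q.2 == "F8-T8") = true
        · simp only [h7, h8, if_true, if_false, Bool.false_eq_true, pvBScan_shift,
            Prod.mk.injEq]
          constructor
          · congr 1; push_cast; ring
          · push_cast; ring
        · simp only [h7, h8, if_false, Bool.false_eq_true, pvBScan_shift, Prod.mk.injEq]
          constructor <;> · congr 1; push_cast; ring

-- ===== VERDICT (by name: the statement is the Claim_ definition above) =====
theorem get_TxFx_channels_spec : Claim_equal_get_TxFx_channels := by
  intro dict_list _ _
  unfold Spec_get_TxFx_channels get_TxFx_channels get_TxFx_channels_alt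
  exact pv_key dict_list
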